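-- pv_equiv track=rewrite | github.com/davidbau/mazesofmenace | tools/c_translator/backend/emitter.py | _merge_adjacent_let_lines
-- ===== SOURCE A (Python) =====
-- def _merge_adjacent_let_lines(lines):
--     merged = []
--     i = 0
--     while i < len(lines):
--         line = lines[i]
--         if not _is_let_line(line):
--             merged.append(line)
--             i += 1
--             continue
--
--         indent = line[: len(line) - len(line.lstrip())]
--         decls = [_let_payload(line)]
--         j = i + 1
--         while j < len(lines) and _is_let_line(lines[j]):
--             next_indent = lines[j][: len(lines[j]) - len(lines[j].lstrip())]
--             if next_indent != indent:
--                 break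
--             candidate = decls + [_let_payload(lines[j])]
--             combined = ", ".join(candidate)
--             if len(combined) > 72:
--                 break
--             decls.append(_let_payload(lines[j]))
--             j += 1
--
--         merged.append(f"{indent}let {', '.join(decls)};")
--         i = j
--     return merged
--
-- def _is_let_line(line):
--     s = line.lstrip()
--     return s.startswith("let ") and s.endswith(";")
--
-- def _let_payload(line):
--     s = line.strip()
--     return s[len("let ") : -1].strip()
-- ===== SOURCE B (Python) =====
-- def _merge_adjacent_let_lines(lines):
--     # One pass with a pending (indent, decls) buffer, flushed on boundaries.
--     out = []
--     pending = None  # (indent, decls) of the group being built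
--     for line in lines:
--         if _is_let_line(line):
--             indent = line[: len(line) - len(line.lstrip())]
--             payload = _let_payload(line)
--             if pending is not None and pending[0] == indent and \
--                     len(", ".join(pending[1] + [payload])) <= 72:
--                 pending = (pending[0], pending[1] + [payload])
--             else:
--                 if pending is not None:
--                     out.append(f"{pending[0]}let {', '.join(pending[1])};")
--                 pending = (indent, [payload])
--         else:
--             if pending is not None:
--                 out.append(f"{pending[0]}let {', '.join(pending[1])};")
--                 pending = None
--             out.append(line)
--     if pending is not None:
--         out.append(f"{pending[0]}let {', '.join(pending[1])};")
--     return out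
--
-- def _is_let_line(line):
--     s = line.lstrip()
--     return s.startswith("let ") and s.endswith(";")
--
-- def _let_payload(line):
--     s = line.strip()
--     return s[len("let ") : -1].strip()
-- ===== Notes on version B (the rewrite author's own statement) =====
-- stated objective: simpler
-- what changed: Replaced the index-based outer/inner while loops (restarting scans at j) by a single linear pass over the lines with a pending (indent, decls) accumulator that is flushed at group boundaries and once at the end.
import Mathlib
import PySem

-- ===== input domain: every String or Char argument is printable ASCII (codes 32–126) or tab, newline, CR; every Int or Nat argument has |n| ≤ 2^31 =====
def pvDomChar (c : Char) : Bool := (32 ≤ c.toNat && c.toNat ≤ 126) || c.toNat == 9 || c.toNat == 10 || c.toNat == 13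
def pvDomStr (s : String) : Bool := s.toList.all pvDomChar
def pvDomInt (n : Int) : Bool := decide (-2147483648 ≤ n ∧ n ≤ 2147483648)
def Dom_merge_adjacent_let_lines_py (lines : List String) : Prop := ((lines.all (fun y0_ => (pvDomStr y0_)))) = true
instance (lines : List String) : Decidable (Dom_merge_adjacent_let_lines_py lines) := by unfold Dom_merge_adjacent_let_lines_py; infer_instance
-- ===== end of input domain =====

-- B replaces A's index-based nested while loops by one linear pass with a pending
-- (indent, decls) accumulator flushed at group boundaries (objective: simpler).

-- ===== PORT A =====
-- shared helpers: both Pythons call _is_let_line and _let_payload verbatim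
def isLetLine (line : String) : Bool :=
  PySem.Str.startswith (PySem.Str.lstrip line) "let " &&
    PySem.Str.endswith (PySem.Str.lstrip line) ";"

def letPayload (line : String) : String :=
  PySem.Str.strip
    (PySem.Str.slice (PySem.Str.strip line) (some 4) (some (-1)))

-- line[: len(line) - len(line.lstrip())]
def indentOf (line : String) : String :=
  PySem.Str.slice line none
    (some ((PySem.Str.len line : Int) - (PySem.Str.len (PySem.Str.lstrip line) : Int)))

-- f"{indent}let {', '.join(decls)};"
def renderLet (indent : String) (decls : List String) : String :=
  indent ++ "let " ++ PySem.Str.join ", " decls ++ ";"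

-- A's inner 'while j < len(lines) and _is_let_line(lines[j]): …' on the suffix after i:
-- returns the accumulated decls and the unconsumed suffix (position j)
def mergeInnerA (indent : String) (decls : List String) : List String → List String × List String
  | [] => (decls, [])
  | l :: rest =>
    if isLetLine l then
      if indentOf l ≠ indent then (decls, l :: rest)
      else if PySem.Str.len (PySem.Str.join ", " (decls ++ [letPayload l])) > 72 then
        (decls, l :: rest)
      else mergeInnerA indent (decls ++ [letPayload l]) rest
    else (decls, l :: rest)

-- termination helper for the outer loop: the inner loop only consumes lines
theorem mergeInnerA_snd_le (indent : String) (decls : List String) :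
    ∀ xs : List String, (mergeInnerA indent decls xs).2.length ≤ xs.length := by
  intro xs
  induction xs generalizing decls with
  | nil => simp [mergeInnerA]
  | cons l rest ih =>
    simp only [mergeInnerA]
    split_ifs with h1 h2 h3
    · simp
    · simp
    · exact le_trans (ih _) (by simp)
    · simp

-- A's outer 'while i < len(lines)' as recursion on the suffix at i
def mergeOuterA : List String → List String
  | [] => []
  | l :: rest =>
    if isLetLine l then
      renderLet (indentOf l) (mergeInnerA (indentOf l) [letPayload l] rest).1 ::
        mergeOuterA (mergeInnerA (indentOf l) [letPayload l] rest).2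
    else l :: mergeOuterA rest
termination_by xs => xs.length
decreasing_by
  · exact Nat.lt_succ_of_le (mergeInnerA_snd_le _ _ rest)
  · simp

def merge_adjacent_let_lines_py (lines : List String) : List String :=
  mergeOuterA lines

-- ===== PORT B =====
-- one step of B's for-loop: state = (out, pending)
def stepB (st : List String × Option (String × List String)) (line : String) :
    List String × Option (String × List String) :=
  if isLetLine line then
    match st.2 with
    | some (ind, ds) =>
      if ind = indentOf line ∧
          PySem.Str.len (PySem.Str.join ", " (ds ++ [letPayload line])) ≤ 72 then
        (st.1, some (ind, ds ++ [letPayload line]))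
      else (st.1 ++ [renderLet ind ds], some (indentOf line, [letPayload line]))
    | none => (st.1, some (indentOf line, [letPayload line]))
  else
    match st.2 with
    | some (ind, ds) => (st.1 ++ [renderLet ind ds, line], none)
    | none => (st.1 ++ [line], none)

-- the final 'if pending is not None: out.append(…)'
def flushB (st : List String × Option (String × List String)) : List String :=
  match st.2 with
  | some (ind, ds) => st.1 ++ [renderLet ind ds]
  | none => st.1

def merge_adjacent_let_lines_py_alt (lines : List String) : List String :=
  flushB (lines.foldl stepB ([], none))

-- ===== PRECONDITION & SPEC =====
def Spec_merge_adjacent_let_lines_py (lines : List String) (out : List String) : Prop := out = merge_adjacent_let_lines_py_alt lines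
instance (lines : List String) (out : List String) : Decidable (Spec_merge_adjacent_let_lines_py lines out) := by unfold Spec_merge_adjacent_let_lines_py; infer_instance

-- ===== CLAIM (what is proved, stated in full; the proofs are below) =====
def Claim_equal_merge_adjacent_let_lines_py : Prop := ∀ (lines : List String), Dom_merge_adjacent_let_lines_py lines → Spec_merge_adjacent_let_lines_py lines (merge_adjacent_let_lines_py lines)

-- ===== LEMMAS AND PROOFS =====

-- B's fold, started in either state, computes A's recursion from that point on
theorem foldB_eq (xs : List String) :
    ∀ out : List String,
      (flushB (xs.foldl stepB (out, none)) = out ++ mergeOuterA xs) ∧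
      (∀ ind ds, flushB (xs.foldl stepB (out, some (ind, ds))) =
        out ++ renderLet ind (mergeInnerA ind ds xs).1 ::
          mergeOuterA (mergeInnerA ind ds xs).2) := by
  induction xs with
  | nil =>
    intro out
    constructor
    · simp [flushB, mergeOuterA]
    · intro ind ds; simp [flushB, mergeInnerA, mergeOuterA]
  | cons l rest ih =>
    intro out
    constructor
    · -- pending = none
      by_cases hlet : isLetLine l
      · simp only [List.foldl_cons, stepB, hlet, if_pos]
        rw [(ih out).2 (indentOf l) [letPayload l]]
        rw [mergeOuterA]
        simp [hlet]
      · simp only [List.foldl_cons, stepB, hlet, Bool.false_eq_true, if_false]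
        rw [(ih (out ++ [l])).1]
        rw [mergeOuterA]
        simp [hlet]
    · -- pending = some (ind, ds)
      intro ind ds
      by_cases hlet : isLetLine l
      · by_cases hc : ind = indentOf l ∧
            PySem.Str.len (PySem.Str.join ", " (ds ++ [letPayload l])) ≤ 72
        · -- extend the group
          simp only [List.foldl_cons, stepB, hlet, if_pos]
          rw [if_pos hc]
          rw [(ih out).2 ind (ds ++ [letPayload l])]
          have : mergeInnerA ind ds (l :: rest) = mergeInnerA ind (ds ++ [letPayload l]) rest := by
            rw [mergeInnerA, if_pos hlet, if_neg (by simp [hc.1]),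
              if_neg (by omega)]
          rw [this]
        · -- flush, start a new group
          simp only [List.foldl_cons, stepB, hlet, if_pos]
          rw [if_neg hc]
          rw [(ih (out ++ [renderLet ind ds])).2 (indentOf l) [letPayload l]]
          have hbreak : mergeInnerA ind ds (l :: rest) = (ds, l :: rest) := by
            rw [mergeInnerA, if_pos hlet]
            rcases not_and_or.mp hc with h | h
            · rw [if_pos (fun he => h he.symm)]
            · by_cases hind : indentOf l ≠ ind
              · rw [if_pos hind]
              · rw [if_neg hind, if_pos (by omega)]
          rw [hbreak]
          rw [show mergeOuterA (l :: rest) =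
              renderLet (indentOf l) (mergeInnerA (indentOf l) [letPayload l] rest).1 ::
                mergeOuterA (mergeInnerA (indentOf l) [letPayload l] rest).2 by
            rw [mergeOuterA]; simp [hlet]]
          simp
      · -- non-let line: flush, emit it
        simp only [List.foldl_cons, stepB, hlet, Bool.false_eq_true, if_false]
        rw [(ih (out ++ [renderLet ind ds, l])).1]
        have : mergeInnerA ind ds (l :: rest) = (ds, l :: rest) := by
          rw [mergeInnerA]; simp [hlet]
        rw [this]
        rw [show mergeOuterA (l :: rest) = l :: mergeOuterA rest by
          rw [mergeOuterA]; simp [hlet]]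
        simp

-- ===== VERDICT (by name: the statement is the Claim_ definition above) =====
theorem merge_adjacent_let_lines_py_spec : Claim_equal_merge_adjacent_let_lines_py := by
  intro lines _
  unfold Spec_merge_adjacent_let_lines_py merge_adjacent_let_lines_py merge_adjacent_let_lines_py_alt
  rw [(foldB_eq lines []).1]
  simp
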